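-- pv_equiv track=rewrite | github.com/JasonKitty/tabuLarEX | nougat/latex2html1.py | grid2html
-- ===== SOURCE A (Python) =====
-- def grid2html(grid):
--     def to_td(grid, r, c):
--         if grid[r][c] == '<<' or grid[r][c] == '^^' or grid[r][c] == '..':
--             return ''
--         td = {'text': grid[r][c], 'rowspan':1, 'colspan': 1}
--
--         for i in range(r + 1, len(grid)):
--             if grid[i][c] == '^^':
--                 td['rowspan'] += 1
--             else:
--                 break
--
--         for j in range(c + 1, len(grid[r])):
--             if grid[r][j] == '<<':
--                 td['colspan'] += 1
--             else:
--                 break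
--         return f'<td rowspan={td["rowspan"]} colspan={td["colspan"]}> {td["text"]} </td>'.replace('rowspan=1', '').replace('colspan=1', '')
--
--
--     html = []
--     for r in range(len(grid)):
--         row = []
--         for c in range(len(grid[0])):
--             row.append(to_td(grid, r, c))
--         html.append(f'<tr> {"".join(row)} </tr>')
--     # for row in grid:
--     #     html.append('<tr>' + ''.join([to_td(c) for c in row]) + '</tr>')
--
--     return '<html><body><table>' + '\n'.join(html) + '</table></body></html>'
-- ===== SOURCE B (Python) =====
-- def grid2html(grid):
--     # One backward pass per column/row precomputes consecutive-span run lengths,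
--     # so each cell's rowspan/colspan is an O(1) lookup: O(R*C) total.
--     if not grid:
--         return '<html><body><table></table></body></html>'
--     C = len(grid[0])
--     # down[r][c] = number of consecutive '^^' cells directly below (r, c)
--     down = []
--     below = None  # (grid row just below, its down row)
--     for row in reversed(grid):
--         if below is None:
--             cur = [0] * C
--         else:
--             brow, bdown = below
--             cur = [bdown[c] + 1 if brow[c] == '^^' else 0 for c in range(C)]
--         down.append(cur)
--         below = (row, cur)
--     down.reverse()
--     rows_html = []
--     for r in range(len(grid)):
--         row = grid[r]
--         # right[c] = number of consecutive '<<' cells directly right of (r, c)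
--         rev = []
--         run = 0
--         for v in reversed(row):
--             rev.append(run)
--             run = run + 1 if v == '<<' else 0
--         right = rev
--         right.reverse()
--         cells = []
--         for c in range(C):
--             v = row[c]
--             if v == '<<' or v == '^^' or v == '..':
--                 cells.append('')
--             else:
--                 cells.append(_td(v, 1 + down[r][c], 1 + right[c]))
--         rows_html.append('<tr> ' + ''.join(cells) + ' </tr>')
--     return '<html><body><table>' + '\n'.join(rows_html) + '</table></body></html>'
--
--
-- def _td(text, rowspan, colspan):
--     return f'<td rowspan={rowspan} colspan={colspan}> {text} </td>'.replace('rowspan=1', '').replace('colspan=1', '')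
-- ===== Notes on version B (the rewrite author's own statement) =====
-- stated objective: faster
-- what changed: Replaced the per-cell downward/rightward scans with one backward pass per grid (and per row) that precomputes consecutive '^^'/'<<' run lengths, making each cell's rowspan/colspan an O(1) lookup.
import Mathlib
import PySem

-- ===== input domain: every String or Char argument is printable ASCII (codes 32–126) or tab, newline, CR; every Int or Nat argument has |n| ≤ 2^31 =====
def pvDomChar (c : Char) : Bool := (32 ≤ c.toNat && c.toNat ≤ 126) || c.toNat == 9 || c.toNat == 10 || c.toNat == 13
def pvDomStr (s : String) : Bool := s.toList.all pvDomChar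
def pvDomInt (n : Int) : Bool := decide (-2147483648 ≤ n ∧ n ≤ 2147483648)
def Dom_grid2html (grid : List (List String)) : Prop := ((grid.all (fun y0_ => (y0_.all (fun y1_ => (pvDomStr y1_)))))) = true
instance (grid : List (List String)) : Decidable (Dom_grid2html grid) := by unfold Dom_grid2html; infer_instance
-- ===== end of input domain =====

-- B replaces A's per-cell downward/rightward scans by one backward run-length pass over the
-- grid (and over each row), so each cell's rowspan/colspan is a precomputed O(1) lookup.

-- ===== PORT A =====
-- 'for i in range(r+1, len(grid)): if grid[i][c] == "^^": rowspan += 1 else: break'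
def pvA_down (grid : List (List String)) (c : Nat) (i : Nat) : Nat :=
  if _h : i < grid.length then
    if (grid.getD i []).getD c "" = "^^" then pvA_down grid c (i + 1) + 1 else 0
  else 0
termination_by grid.length - i
decreasing_by omega

-- 'for j in range(c+1, len(grid[r])): if grid[r][j] == "<<": colspan += 1 else: break'
def pvA_right (row : List String) (j : Nat) : Nat :=
  if _h : j < row.length then
    if row.getD j "" = "<<" then pvA_right row (j + 1) + 1 else 0
  else 0
termination_by row.length - j
decreasing_by omega

def pvA_td (grid : List (List String)) (r c : Nat) : String :=
  let v := (grid.getD r []).getD c ""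
  if v = "<<" ∨ v = "^^" ∨ v = ".." then ""
  else
    let rowspan : Nat := 1 + pvA_down grid c (r + 1)
    let colspan : Nat := 1 + pvA_right (grid.getD r []) (c + 1)
    PySem.Str.replace (PySem.Str.replace
      ("<td rowspan=" ++ PySem.Int.toStr (rowspan : Int) ++ " colspan=" ++ PySem.Int.toStr (colspan : Int) ++ "> " ++ v ++ " </td>")
      "rowspan=1" "") "colspan=1" ""

def grid2html (grid : List (List String)) : String :=
  let html := (List.range grid.length).foldl (fun acc r =>
    acc ++ ["<tr> " ++
      PySem.Str.join "" ((List.range (grid.headD []).length).foldl (fun row c => row ++ [pvA_td grid r c]) []) ++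
      " </tr>"]) []
  "<html><body><table>" ++ PySem.Str.join "\n" html ++ "</table></body></html>"

-- ===== PORT B =====
def pvB_td (text : String) (rowspan colspan : Nat) : String :=
  PySem.Str.replace (PySem.Str.replace
    ("<td rowspan=" ++ PySem.Int.toStr (rowspan : Int) ++ " colspan=" ++ PySem.Int.toStr (colspan : Int) ++ "> " ++ text ++ " </td>")
    "rowspan=1" "") "colspan=1" ""

-- one step of Source B's 'for row in reversed(grid)' loop (state: down rows so far, 'below')
def pvB_downStep (C : Nat) (st : List (List Nat) × Option (List String × List Nat))
    (row : List String) : List (List Nat) × Option (List String × List Nat) :=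
  let cur := match st.2 with
    | none => List.replicate C 0
    | some (brow, bdown) => (List.range C).map (fun c => if brow.getD c "" = "^^" then bdown.getD c 0 + 1 else 0)
  (st.1 ++ [cur], some (row, cur))

def pvB_downTable (grid : List (List String)) (C : Nat) : List (List Nat) :=
  (grid.reverse.foldl (pvB_downStep C) ([], none)).1.reverse

-- Source B's per-row scan over reversed(row) building 'rev', then reversed into 'right'
def pvB_rightRow (row : List String) : List Nat :=
  (row.reverse.foldl (fun st v => (st.1 ++ [st.2], if v = "<<" then st.2 + 1 else 0))
    (([] : List Nat), 0)).1.reverse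

def grid2html_alt (grid : List (List String)) : String :=
  if grid = [] then "<html><body><table></table></body></html>"
  else
    let C := (grid.headD []).length
    let down := pvB_downTable grid C
    let rowsHtml := (List.range grid.length).foldl (fun acc r =>
      let row := grid.getD r []
      let right := pvB_rightRow row
      let cells := (List.range C).foldl (fun cs c =>
        let v := row.getD c ""
        cs ++ [if v = "<<" ∨ v = "^^" ∨ v = ".." then ""
               else pvB_td v (1 + (down.getD r []).getD c 0) (1 + right.getD c 0)]) []
      acc ++ ["<tr> " ++ PySem.Str.join "" cells ++ " </tr>"]) []
    "<html><body><table>" ++ PySem.Str.join "\n" rowsHtml ++ "</table></body></html>"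

-- ===== PRECONDITION & SPEC =====
-- Python A raises IndexError exactly on grids where some row is shorter than the first row
-- (it indexes every row at every column index of row 0); Pre_ excludes those grids.
def Pre_grid2html (grid : List (List String)) : Prop :=
  ∀ row ∈ grid, (grid.headD []).length ≤ row.length
instance (grid : List (List String)) : Decidable (Pre_grid2html grid) := by
  unfold Pre_grid2html; infer_instance

def pvWitness_grid2html : List (List String) := [["a", "<<"], ["^^", "b"]]

def Spec_grid2html (grid : List (List String)) (out : String) : Prop := out = grid2html_alt grid
instance (grid : List (List String)) (out : String) : Decidable (Spec_grid2html grid out) := by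
  unfold Spec_grid2html; infer_instance

-- ===== CLAIM (what is proved, stated in full; the proofs are below) =====
def Claim_equal_grid2html : Prop :=
  ∀ (grid : List (List String)), Dom_grid2html grid → Pre_grid2html grid →
    Spec_grid2html grid (grid2html grid)

-- ===== LEMMAS AND PROOFS =====
-- run of consecutive '^^' entries in column c down a list of rows
def pvRunD (c : Nat) : List (List String) → Nat
  | [] => 0
  | row :: rest => if row.getD c "" = "^^" then pvRunD c rest + 1 else 0

-- run of consecutive '<<' entries along a row
def pvRunR : List String → Nat
  | [] => 0
  | v :: rest => if v = "<<" then pvRunR rest + 1 else 0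

def pvSpecRow (C : Nat) (rest : List (List String)) : List Nat :=
  (List.range C).map (fun c => pvRunD c rest)

def pvSpecRows (C : Nat) : List (List String) → List (List Nat)
  | [] => []
  | _ :: rest => pvSpecRow C rest :: pvSpecRows C rest

def pvSpecR : List String → List Nat
  | [] => []
  | _ :: rest => pvRunR rest :: pvSpecR rest

theorem pvSpecRow_getD (C : Nat) (rest : List (List String)) (c : Nat) (hc : c < C) :
    (pvSpecRow C rest).getD c 0 = pvRunD c rest := by
  simp [pvSpecRow, List.getD_eq_getElem?_getD, hc]

theorem pvSpecR_getD :
    ∀ (row : List String) (c : Nat), c < row.length →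
      (pvSpecR row).getD c 0 = pvRunR (row.drop (c + 1)) := by
  intro row
  induction row with
  | nil => intro c hc; simp at hc
  | cons v rest ih =>
    intro c hc
    cases c with
    | zero => simp [pvSpecR]
    | succ c => simpa [pvSpecR] using ih c (by simpa using hc)

theorem pvSpecRows_getD (C : Nat) :
    ∀ (grid : List (List String)) (r : Nat), r < grid.length →
      (pvSpecRows C grid).getD r [] = pvSpecRow C (grid.drop (r + 1)) := by
  intro grid
  induction grid with
  | nil => intro r hr; simp at hr
  | cons row rest ih =>
    intro r hr
    cases r with
    | zero => simp [pvSpecRows]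
    | succ r => simpa [pvSpecRows] using ih r (by simpa using hr)

theorem pvA_down_eq (grid : List (List String)) (c : Nat) :
    ∀ i, pvA_down grid c i = pvRunD c (grid.drop i) := by
  intro i
  induction hn : grid.length - i using Nat.strong_induction_on generalizing i with
  | _ n ih =>
    rw [pvA_down]
    by_cases h : i < grid.length
    · rw [List.drop_eq_getElem_cons h]
      have : grid.getD i [] = grid[i] := List.getD_eq_getElem grid [] h
      rw [pvRunD, this]
      split_ifs with hv
      · rw [ih (grid.length - (i + 1)) (by omega) (i + 1) rfl]
      · rfl
    · simp [h, List.drop_eq_nil_of_le (by omega : grid.length ≤ i), pvRunD]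

theorem pvA_right_eq (row : List String) :
    ∀ j, pvA_right row j = pvRunR (row.drop j) := by
  intro j
  induction hn : row.length - j using Nat.strong_induction_on generalizing j with
  | _ n ih =>
    rw [pvA_right]
    by_cases h : j < row.length
    · rw [List.drop_eq_getElem_cons h]
      have : row.getD j "" = row[j] := List.getD_eq_getElem row "" h
      rw [pvRunR, this]
      split_ifs with hv
      · rw [ih (row.length - (j + 1)) (by omega) (j + 1) rfl]
      · rfl
    · simp [h, List.drop_eq_nil_of_le (by omega : row.length ≤ j), pvRunR]

theorem pvB_downFold (C : Nat) (grid : List (List String)) :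
    grid.reverse.foldl (pvB_downStep C) ([], none) =
      ((pvSpecRows C grid).reverse,
       match grid with
       | [] => none
       | row :: rest => some (row, pvSpecRow C rest)) := by
  induction grid with
  | nil => simp [pvSpecRows]
  | cons row rest ih =>
    rw [List.reverse_cons, List.foldl_append, ih]
    cases rest with
    | nil =>
      simp [pvB_downStep, pvSpecRows, pvSpecRow, pvRunD, List.map_const']
    | cons brow rrest =>
      have hcur : (List.range C).map
          (fun c => if brow.getD c "" = "^^" then (pvSpecRow C rrest).getD c 0 + 1 else 0)
          = pvSpecRow C (brow :: rrest) := by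
        conv_rhs => rw [pvSpecRow]
        apply List.map_congr_left
        intro c hc
        rw [pvSpecRow_getD C rrest c (List.mem_range.mp hc), pvRunD]
      simp only [List.foldl_cons, List.foldl_nil, pvB_downStep]
      rw [hcur]
      simp [pvSpecRows]

theorem pvB_downTable_eq (grid : List (List String)) (C : Nat) :
    pvB_downTable grid C = pvSpecRows C grid := by
  rw [pvB_downTable, pvB_downFold]
  simp

theorem pvB_rightFold (row : List String) :
    row.reverse.foldl (fun st v => (st.1 ++ [st.2], if v = "<<" then st.2 + 1 else 0))
      (([] : List Nat), 0) = ((pvSpecR row).reverse, pvRunR row) := by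
  induction row with
  | nil => simp [pvSpecR, pvRunR]
  | cons v rest ih =>
    simp [List.foldl_append, ih, pvSpecR, pvRunR]

theorem pvB_rightRow_eq (row : List String) : pvB_rightRow row = pvSpecR row := by
  rw [pvB_rightRow, pvB_rightFold]
  simp

theorem pvCell_eq (grid : List (List String)) (hPre : Pre_grid2html grid)
    (r c : Nat) (hr : r < grid.length) (hc : c < (grid.headD []).length) :
    pvA_td grid r c =
      (if (grid.getD r []).getD c "" = "<<" ∨ (grid.getD r []).getD c "" = "^^" ∨ (grid.getD r []).getD c "" = ".."
       then ""
       else pvB_td ((grid.getD r []).getD c "")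
              (1 + ((pvB_downTable grid (grid.headD []).length).getD r []).getD c 0)
              (1 + (pvB_rightRow (grid.getD r [])).getD c 0)) := by
  have hrow : grid.getD r [] ∈ grid := by
    rw [List.getD_eq_getElem grid [] hr]; exact List.getElem_mem hr
  have hcrow : c < (grid.getD r []).length := lt_of_lt_of_le hc (hPre _ hrow)
  have hdown : ((pvB_downTable grid (grid.headD []).length).getD r []).getD c 0
      = pvA_down grid c (r + 1) := by
    rw [pvB_downTable_eq, pvSpecRows_getD _ grid r hr, pvSpecRow_getD _ _ c hc, pvA_down_eq]
  have hright : (pvB_rightRow (grid.getD r [])).getD c 0 = pvA_right (grid.getD r []) (c + 1) := by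
    rw [pvB_rightRow_eq, pvSpecR_getD _ c hcrow, pvA_right_eq]
  rw [pvA_td, pvB_td, hdown, hright]

-- ===== VERDICT (by name: the statement is the Claim_ definition above) =====
theorem grid2html_spec : Claim_equal_grid2html := by
  intro grid _ hPre
  show grid2html grid = grid2html_alt grid
  cases hg : grid with
  | nil => rfl
  | cons h t =>
    subst hg
    simp only [grid2html, grid2html_alt, if_neg (show ¬(h :: t = []) by simp)]
    simp only [PySem.List.foldl_append_singleton_eq_map, List.nil_append]
    have key : (List.range (h :: t).length).map (fun r =>
        "<tr> " ++ PySem.Str.join "" ((List.range ((h :: t).headD []).length).map (fun c => pvA_td (h :: t) r c)) ++ " </tr>")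
      = (List.range (h :: t).length).map (fun r =>
        "<tr> " ++ PySem.Str.join "" ((List.range ((h :: t).headD []).length).map (fun c =>
          if ((h :: t).getD r []).getD c "" = "<<" ∨ ((h :: t).getD r []).getD c "" = "^^" ∨ ((h :: t).getD r []).getD c "" = ".."
          then ""
          else pvB_td (((h :: t).getD r []).getD c "")
            (1 + ((pvB_downTable (h :: t) ((h :: t).headD []).length).getD r []).getD c 0)
            (1 + (pvB_rightRow ((h :: t).getD r [])).getD c 0))) ++ " </tr>") := by
      apply List.map_congr_left
      intro r hrm
      have hr := List.mem_range.mp hrm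
      rw [List.map_congr_left (fun c hcm => pvCell_eq _ hPre r c hr (List.mem_range.mp hcm))]
    rw [key]
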